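-- pv_equiv track=rewrite | github.com/OhHobin/2022-2-git-repository | basicai_fa22/intermediate/081~100/problem086.py | solution
-- ===== SOURCE A (Python) =====
-- def solution(접시점수, 먹을접시위치):
--     먹을접시위치 -= 1
--     정답 = 0
--     정렬된접시점수 = sorted(접시점수)
--     while True:
--         맨앞접시 = 접시점수.pop(0)
--         if 정렬된접시점수[0] == 맨앞접시:
--             if 먹을접시위치 == 0:
--                 break
--             먹을접시위치 -= 1
--             정렬된접시점수.pop(0)
--         else:
--             접시점수.append(맨앞접시)
--             먹을접시위치 = len(접시점수) - 1 if 먹을접시위치 == 0 else 먹을접시위치 - 1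
--         정답 += 1
--     return 정답
-- ===== SOURCE B (Python) =====
-- def solution(접시점수, 먹을접시위치):
--     # Tag each plate with its original position, then jump straight to the next minimum
--     # (min/index) instead of rotating one step at a time; stop when the tagged target plate
--     # is the minimum about to be eaten.
--     q = [(v, i) for i, v in enumerate(접시점수)]
--     tgt = 먹을접시위치 - 1
--     ops = 0
--     while True:
--         vals = [v for v, _ in q]
--         m = min(vals)
--         j = vals.index(m)
--         if q[j][1] == tgt:
--             return ops + j
--         ops += j + 1
--         q = q[j + 1:] + q[:j]
-- ===== Notes on version B (the rewrite author's own statement) =====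
-- stated objective: faster
-- what changed: B drops A's precomputed sorted list and one-step rotations: it tags each plate with its original position via enumerate, jumps straight to the first occurrence of the current minimum with min/index (counting the skipped rotations in one block), and stops when the tagged target plate is the minimum about to be eaten.
-- outside the precondition, e.g. on solution([2, 1, 3], 5): A returns 4, B raises ValueError; on solution([-1, -3, 2, -2, 2, -2], 7): A returns 6, B raises ValueError
import Mathlib
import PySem

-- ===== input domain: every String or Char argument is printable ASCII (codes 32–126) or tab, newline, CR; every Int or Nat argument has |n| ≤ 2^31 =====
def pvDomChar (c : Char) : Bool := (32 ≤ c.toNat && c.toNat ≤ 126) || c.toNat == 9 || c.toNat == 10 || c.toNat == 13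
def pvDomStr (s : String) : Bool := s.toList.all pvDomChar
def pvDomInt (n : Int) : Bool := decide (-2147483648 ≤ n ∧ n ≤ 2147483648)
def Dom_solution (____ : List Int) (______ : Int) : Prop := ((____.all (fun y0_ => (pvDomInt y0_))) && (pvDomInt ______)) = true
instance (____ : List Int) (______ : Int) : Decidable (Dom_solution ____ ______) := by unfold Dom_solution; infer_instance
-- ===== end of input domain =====

-- B replaces A's one-step rotations + maintained sorted list by jumping straight to the first
-- occurrence of the current minimum (min/index) and counting the skipped rotations in one block
-- (objective: faster — measured ≥1.5× in a timing run; block jumps replace per-plate pop(0) rotations). A mutates its list argument in place (pop/append); the equivalence proved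
-- here is about the RETURN value only — B does not mutate.


-- ===== PORT A =====
-- A's while-True loop; fuel only makes it total (unreachable with the fuel solution supplies,
-- on Pre_). State: queue, maintained sorted list, target index, op count.
def loopA : Nat → List Int → List Int → Int → Int → Int
  | 0, _, _, _, acc => acc
  | f + 1, q, sq, t, acc =>
    match q, sq with
    | front :: rest, m :: stail =>
      if m = front then
        if t = 0 then acc
        else loopA f rest stail (t - 1) (acc + 1)
      else
        loopA f (rest ++ [front]) (m :: stail)
          (if t = 0 then ((rest ++ [front]).length : Int) - 1 else t - 1) (acc + 1)
    | _, _ => acc   -- empty pop / sq[0]: IndexError in Python (outside Pre_)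

def solution (____ : List Int) (______ : Int) : Int :=
  loopA ((____.length + 1) * (____.length + 1)) ____
    (PySem.List.sorted ____ (fun x => x) false) (______ - 1) 0

-- ===== PORT B =====
-- Source B's loop over (value, original index) pairs; each iteration eats one plate, so fuel
-- length+1 suffices (guard for totality only). q[j+1:] + q[:j] with j = vals.index(min(vals))
-- : Nat is drop/take (exact: j ≥ 0); q[j] is pyGetD (exact: j < len whenever min() succeeded).
def loopB : Nat → List (Int × Int) → Int → Int → Int
  | 0, _, _, acc => acc
  | f + 1, q, tgt, acc =>
    let vals := q.map (fun x => x.1)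
    match PySem.List.min? vals (fun x => x) with
    | none => acc   -- min([]): ValueError in Python (outside Pre_)
    | some m =>
      let j := (PySem.List.index? vals m).getD 0
      if (PySem.List.pyGetD q (j : Int) (0, 0)).2 = tgt then acc + (j : Int)
      else loopB f (q.drop (j + 1) ++ q.take j) tgt (acc + (j : Int) + 1)

def solution_alt (____ : List Int) (______ : Int) : Int :=
  loopB (____.length + 1) ((PySem.List.enumerate ____).map (fun iv => (iv.2, iv.1)))
    (______ - 1) 0

-- ===== PRECONDITION & SPEC =====
-- Pre_ restricts to the natural domain: a nonempty queue and a valid plate position 1..len.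
-- Outside it A usually raises IndexError popping an emptied list; on some out-of-range positions
-- the wrapped leftover counter makes A return a value, but an out-of-range position is malformed
-- input for this task, so those inputs are excluded rather than matched.
def Pre_solution (____ : List Int) (______ : Int) : Prop :=
  ____ ≠ [] ∧ 1 ≤ ______ ∧ ______ ≤ (____.length : Int)
instance (____ : List Int) (______ : Int) : Decidable (Pre_solution ____ ______) := by
  unfold Pre_solution; infer_instance
def pvWitness_solution : List Int × Int := ([3, 1, 2], 3)

def Spec_solution (____ : List Int) (______ : Int) (out : Int) : Prop := out = solution_alt ____ ______
instance (____ : List Int) (______ : Int) (out : Int) : Decidable (Spec_solution ____ ______ out) := by unfold Spec_solution; infer_instance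

-- ===== CLAIM (what is proved, stated in full; the proofs are below) =====
def Claim_equal_solution : Prop := ∀ (____ : List Int) (______ : Int), Dom_solution ____ ______ → Pre_solution ____ ______ → Spec_solution ____ ______ (solution ____ ______)

-- ===== LEMMAS AND PROOFS =====

-- Python's (t - j) % len for 0 < len is Int.emod.
theorem pvMod_pos (a n : Int) (hn : 0 < n) : PySem.Int.mod a n = a % n :=
  PySem.Int.mod_eq_emod_of_pos hn

theorem pvMod_self_of_lt (t n : Int) (h0 : 0 ≤ t) (h1 : t < n) :
    PySem.Int.mod t n = t := by
  rw [pvMod_pos t n (lt_of_le_of_lt h0 h1)]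
  exact Int.emod_eq_of_lt h0 h1

-- j rotations of A's loop, while the head differs from the sorted head m.
theorem rotA (j : Nat) : ∀ (q : List Int) (m : Int) (s : List Int) (t acc : Int) (fA : Nat),
    j + 1 ≤ fA → j < q.length → 0 ≤ t → t < (q.length : Int) →
    (∀ x ∈ q.take j, x ≠ m) →
    loopA fA q (m :: s) t acc
      = loopA (fA - j) (q.drop j ++ q.take j) (m :: s)
          (PySem.Int.mod (t - (j : Int)) (q.length : Int)) (acc + (j : Int)) := by
  induction j with
  | zero =>
    intro q m s t acc fA _ _ h0 h1 _
    simp [pvMod_self_of_lt t _ h0 h1]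
  | succ j ih =>
    intro q m s t acc fA hfA hj h0 h1 hne
    match q, fA with
    | a :: rest, fA + 1 =>
      have ha : a ≠ m := hne a (by simp)
      have hjr : j < rest.length := by simpa using hj
      have hlen : ((a :: rest).length : Int) = (rest.length : Int) + 1 := by simp
      rw [loopA]
      rw [if_neg (show ¬ (m = a) from fun h => ha h.symm)]
      have hlen2 : ((rest ++ [a]).length : Int) = (rest.length : Int) + 1 := by simp
      set t₁ : Int := if t = 0 then ((rest ++ [a]).length : Int) - 1 else t - 1 with ht₁
      have h0' : 0 ≤ t₁ := by
        rw [ht₁]; split_ifs with h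
        · rw [hlen2]; omega
        · omega
      have h1' : t₁ < ((rest ++ [a]).length : Int) := by
        rw [ht₁, hlen2]; split_ifs with h
        · omega
        · rw [hlen] at h1; omega
      have ih' := ih (rest ++ [a]) m s t₁ (acc + 1) fA (by omega)
        (by simp; omega) h0' h1'
        (by
          intro x hx
          rw [List.take_append_of_le_length (by omega)] at hx
          exact hne x (by rw [List.take_succ_cons]; exact List.mem_cons_of_mem _ hx))
      rw [ih']
      have hdrop : (rest ++ [a]).drop j = rest.drop j ++ [a] :=
        List.drop_append_of_le_length (by omega)
      have htake : (rest ++ [a]).take j = rest.take j :=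
        List.take_append_of_le_length (by omega)
      have hq1 : (rest ++ [a]).drop j ++ (rest ++ [a]).take j
          = (a :: rest).drop (j + 1) ++ (a :: rest).take (j + 1) := by
        rw [hdrop, htake]; simp
      have hmod : PySem.Int.mod (t₁ - (j : Int)) ((rest ++ [a]).length : Int)
          = PySem.Int.mod (t - ((j + 1 : Nat) : Int)) ((a :: rest).length : Int) := by
        rw [hlen2, hlen]
        set n : Int := (rest.length : Int) + 1 with hn
        rw [ht₁]
        split_ifs with h
        · rw [hlen2]
          rw [pvMod_pos _ n (by omega), pvMod_pos _ n (by omega)]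
          rw [show (n - 1 - (j : Int)) = (t - ((j + 1 : Nat) : Int)) + n * 1 by
            push_cast; omega]
          exact Int.add_mul_emod_self_left _ _ _
        · congr 1
          push_cast; omega
      rw [hq1, hmod]
      have hacc : acc + 1 + (j : Int) = acc + ((j + 1 : Nat) : Int) := by push_cast; omega
      rw [hacc]
      congr 1
      omega

-- The Python min of a nonempty list is the head of its sorted copy.
theorem min_eq_sorted_head (q : List Int) (m : Int) (s : List Int)
    (h : PySem.List.sorted q (fun x => x) false = m :: s) :
    PySem.List.min? q (fun x => x) = some m := by
  have hmq : m ∈ q := by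
    have := PySem.List.mem_sorted (xs := q) (key := fun x => x) (rev := false) (x := m)
    rw [h] at this
    exact this.mp (by simp)
  obtain ⟨m', hm'⟩ : ∃ m', PySem.List.min? q (fun x => x) = some m' := by
    cases hq : PySem.List.min? q (fun x => x) with
    | none =>
      rw [PySem.List.min?_eq_none_iff] at hq
      subst hq; simp at hmq
    | some m' => exact ⟨m', rfl⟩
  have hmem' : m' ∈ q := PySem.List.min?_mem hm'
  have h1 : m' ≤ m := PySem.List.min?_isMin hm' m hmq
  have h2 : m ≤ m' := PySem.List.key_head_sorted_le q (fun x => x) h m' hmem'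
  rw [hm', le_antisymm h1 h2]

-- Main invariant: A's loop on the plate values with their sorted copy equals B's loop on the
-- tagged plates, when tn is the queue position of the tagged target plate.
theorem mainLoop (fB : Nat) : ∀ (p : List (Int × Int)) (tn : Nat) (tgt acc : Int) (fA : Nat)
    (h1 : tn < p.length),
    (p.map Prod.snd).Nodup → p[tn].2 = tgt →
    p.length ≤ fB → p.length * p.length ≤ fA →
    loopA fA (p.map Prod.fst) (PySem.List.sorted (p.map Prod.fst) (fun x => x) false)
      (tn : Int) acc = loopB fB p tgt acc := by
  induction fB with
  | zero =>
    intro p tn tgt acc fA h1 _ _ hB _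
    omega
  | succ fB ih =>
    intro p tn tgt acc fA h1 hnd htgt hB hA
    set vals := p.map Prod.fst with hvals
    have hlen : vals.length = p.length := by rw [hvals]; simp
    have hqlen : 0 < p.length := by omega
    obtain ⟨m, s, hms⟩ : ∃ m s, PySem.List.sorted vals (fun x => x) false = m :: s := by
      cases hs : PySem.List.sorted vals (fun x => x) false with
      | nil =>
        rw [PySem.List.sorted_eq_nil_iff] at hs
        exfalso; rw [hs] at hlen; simp at hlen; omega
      | cons m s => exact ⟨m, s, rfl⟩
    have hmin := min_eq_sorted_head vals m s hms
    have hmq : m ∈ vals := PySem.List.min?_mem hmin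
    obtain ⟨j, hj⟩ : ∃ j, PySem.List.index? vals m = some j := by
      cases hi : PySem.List.index? vals m with
      | none => rw [PySem.List.index?_eq_none_iff] at hi; exact absurd hmq hi
      | some j => exact ⟨j, rfl⟩
    obtain ⟨pre, suf, hsplit, hplen, hpre⟩ := (PySem.List.index?_eq_some_iff vals m j).mp hj
    have hjlt : j < p.length := by
      have : vals.length = pre.length + suf.length + 1 := by rw [hsplit]; simp; omega
      omega
    have hmul : p.length ≤ p.length * p.length := Nat.le_mul_of_pos_left p.length hqlen
    -- rotate A's loop j steps
    rw [hms, rotA j vals m s (tn : Int) acc fA (by omega) (by omega) (by positivity)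
      (by rw [hlen]; exact_mod_cast h1)
      (by intro x hx hxm; rw [hsplit, ← hplen, List.take_left] at hx; exact hpre (hxm ▸ hx))]
    have hdropj : vals.drop j = m :: suf := by
      rw [hsplit, ← hplen]; simp
    have htakej : vals.take j = pre := by
      rw [hsplit, ← hplen]; exact List.take_left
    have hdropj1 : vals.drop (j + 1) = suf := by
      rw [hsplit, ← hplen]
      rw [show pre.length + 1 = (pre ++ [m]).length by simp]
      rw [show pre ++ m :: suf = (pre ++ [m]) ++ suf by simp]
      simp
    -- unfold B one step
    rw [loopB]
    simp only [← hvals, hmin, hj, Option.getD_some]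
    rw [PySem.List.pyGetD_natCast p j (0, 0), List.getD_eq_getElem p (0, 0) hjlt]
    have hsnd : ∀ (i : Nat) (h : i < p.length), p[i].2 = (p.map Prod.snd)[i]'(by simpa) := by
      intro i h; simp
    have hiff : p[j].2 = tgt ↔ j = tn := by
      constructor
      · intro he
        have : (p.map Prod.snd)[j]'(by simpa) = (p.map Prod.snd)[tn]'(by simpa) := by
          rw [← hsnd j hjlt, ← hsnd tn h1, he, htgt]
        exact (List.Nodup.getElem_inj_iff hnd).mp this
      · intro he; subst he; exact htgt
    -- A side: one step on the rotated queue (head = m)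
    have hfA1 : 1 ≤ fA - j := by omega
    obtain ⟨fA', hfA'⟩ : ∃ fA', fA - j = fA' + 1 := ⟨fA - j - 1, by omega⟩
    rw [hdropj, htakej, hfA', List.cons_append, loopA]
    rw [if_pos rfl]
    set t' : Int := PySem.Int.mod ((tn : Int) - (j : Int)) (vals.length : Int) with ht'
    have hmodsplit : (j ≤ tn → t' = (tn : Int) - (j : Int)) ∧
        (tn < j → t' = (tn : Int) - (j : Int) + (p.length : Int)) := by
      constructor
      · intro hle
        rw [ht', hlen]
        exact pvMod_self_of_lt ((tn : Int) - (j : Int)) ((p.length : Int)) (by omega) (by omega)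
      · intro hlt
        rw [ht', hlen, pvMod_pos _ _ (by exact_mod_cast hqlen)]
        conv_lhs => rw [show ((tn : Int) - (j : Int)) = ((tn : Int) - (j : Int) + (p.length : Int)) + (p.length : Int) * (-1) by ring]
        rw [Int.add_mul_emod_self_left]
        have h0b : (0 : Int) ≤ (tn : Int) - (j : Int) + (p.length : Int) := by omega
        have h1b : (tn : Int) - (j : Int) + (p.length : Int) < (p.length : Int) := by omega
        exact Int.emod_eq_of_lt h0b h1b
    have ht'iff : t' = 0 ↔ j = tn := by
      rcases Nat.lt_or_ge tn j with hlt | hge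
      · have := hmodsplit.2 hlt; omega
      · have := hmodsplit.1 hge; omega
    by_cases hjtn : j = tn
    · rw [if_pos (ht'iff.mpr hjtn), if_pos (hiff.mpr hjtn)]
    · rw [if_neg (fun h => hjtn (ht'iff.mp h)), if_neg (fun h => hjtn (hiff.mp h))]
      -- eat step: both recurse on the queue with the minimum removed
      have hsorted' : PySem.List.sorted (suf ++ pre) (fun x => x) false = s := by
        apply PySem.List.sorted_id_eq_of_perm_of_pairwise
        · have hperm0 : (m :: s).Perm (pre ++ m :: suf) := by
            rw [← hms, ← hsplit]; exact PySem.List.sorted_perm vals _ _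
          have hperm : (m :: s).Perm (m :: (suf ++ pre)) :=
            hperm0.trans (List.perm_middle.trans (List.Perm.cons m List.perm_append_comm))
          exact hperm.cons_inv
        · have hp := PySem.List.sorted_pairwise (xs := vals) (key := fun x => x)
          rw [hms] at hp
          exact hp.of_cons
      set p' : List (Int × Int) := p.drop (j + 1) ++ p.take j with hp'
      have hp'fst : p'.map Prod.fst = suf ++ pre := by
        rw [hp']; rw [List.map_append, List.map_drop, List.map_take, ← hvals, hdropj1, htakej]
      have hp'len : p'.length = p.length - 1 := by rw [hp']; simp; omega
      -- the new position of the target plate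
      set tn' : Nat := if j < tn then tn - j - 1 else tn + (p.length - j - 1) with htn'
      have htn'lt : tn' < p'.length := by rw [htn', hp'len]; split_ifs <;> omega
      have hq' : p'[tn']? = p[tn]? := by
        rw [hp', List.getElem?_append]
        by_cases hlt : j < tn
        · rw [if_pos (by simp only [htn', if_pos hlt, List.length_drop]; omega)]
          rw [List.getElem?_drop]
          congr 1
          rw [htn', if_pos hlt]; omega
        · rw [if_neg (by simp only [htn', if_neg hlt, List.length_drop]; omega)]
          rw [List.getElem?_take, if_pos (by simp only [htn', if_neg hlt, List.length_drop]; omega)]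
          congr 1
          rw [htn', if_neg hlt]; simp; omega
      have hget' : (p'[tn']'htn'lt).2 = tgt := by
        rw [← htgt]
        have h1' := List.getElem?_eq_getElem htn'lt
        have h2' := List.getElem?_eq_getElem h1
        rw [h1', h2'] at hq'
        rw [Option.some_inj.mp hq']
      have hnd' : (p'.map Prod.snd).Nodup := by
        have hmape : p'.map Prod.snd
            = (p.map Prod.snd).drop (j + 1) ++ (p.map Prod.snd).take j := by
          rw [hp', List.map_append, List.map_drop, List.map_take]
        rw [hmape]
        have hperm : ((p.map Prod.snd).drop (j + 1) ++ (p.map Prod.snd).take j).Perm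
            ((p.map Prod.snd).eraseIdx j) := by
          rw [List.eraseIdx_eq_take_drop_succ]
          exact List.perm_append_comm
        exact hperm.nodup_iff.mpr (hnd.eraseIdx j)
      have ht'cast : t' - 1 = ((tn' : Nat) : Int) := by
        rw [htn']
        rcases Nat.lt_or_ge tn j with hlt | hge
        · rw [hmodsplit.2 hlt, if_neg (by omega)]
          push_cast; omega
        · have hjne : j ≠ tn := hjtn
          rw [hmodsplit.1 hge, if_pos (by omega)]
          omega
      have := ih p' tn' tgt (acc + (j : Int) + 1) fA' htn'lt hnd' hget'
        (by omega)
        (by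
          obtain ⟨kk, hkk⟩ : ∃ kk, p.length = kk + 1 := ⟨p.length - 1, by omega⟩
          have hfAeq : fA = fA' + 1 + j := by omega
          have hA' : (kk + 1) * (kk + 1) ≤ fA' + 1 + j := by rw [← hkk, ← hfAeq]; exact hA
          have hjk : j ≤ kk := by omega
          rw [hp'len, hkk]
          simp only [Nat.add_sub_cancel]
          nlinarith [hA', hjk])
      rw [hp'fst, hsorted'] at this
      rw [ht'cast]
      exact this

-- ===== VERDICT (by name: the statement is the Claim_ definition above) =====
theorem solution_spec : Claim_equal_solution := by
  intro l k _ hpre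
  obtain ⟨hne, hk1, hk2⟩ := hpre
  show solution l k = solution_alt l k
  unfold solution solution_alt
  set p : List (Int × Int) := (PySem.List.enumerate l).map (fun iv => (iv.2, iv.1)) with hp
  have hfst : p.map Prod.fst = l := by
    rw [hp, List.map_map]
    exact PySem.List.map_snd_enumerate l 0
  have hsnd : p.map Prod.snd = PySem.List.pyRange 0 (0 + l.length) 1 := by
    rw [hp, List.map_map]
    exact PySem.List.map_fst_enumerate l 0
  have hplen : p.length = l.length := by rw [hp]; simp [PySem.List.length_enumerate]
  set tn : Nat := (k - 1).toNat with htn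
  have htnlt : tn < p.length := by rw [hplen]; omega
  have hget : p[tn].2 = k - 1 := by
    have h2 : p[tn].2 = (p.map Prod.snd)[tn]'(by simpa) := by simp
    rw [h2, List.getElem_of_eq hsnd, PySem.List.getElem_pyRange_one]
    omega
  have := mainLoop (l.length + 1) p tn (k - 1) 0 ((l.length + 1) * (l.length + 1)) htnlt
    (by rw [hsnd]; exact PySem.List.nodup_pyRange_one _ _) hget
    (by omega) (by rw [hplen]; exact Nat.mul_le_mul (by omega) (by omega))
  rw [hfst] at this
  rw [show ((tn : Nat) : Int) = k - 1 by omega] at this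
  exact this
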